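-- pv_equiv track=rewrite | github.com/HeeJeongOh/algorithm | programmers/p42888.py | solution
-- ===== SOURCE A (Python) =====
-- def solution(record):
--     case = {}
--     for s in record:
--         tmp = s.split()
--         if tmp[0] == 'Enter' or tmp[0] == 'Change':
--             case[tmp[1]] = tmp[2]
--
--     answer = []
--     for s in record:
--         result = ''
--         tmp = s.split()
--         if tmp[0] == 'Enter':
--             result += case[tmp[1]] + '님이 들어왔습니다.'
--         elif tmp[0] == 'Leave':
--             result += case[tmp[1]] + '님이 나갔습니다.'
--         else:
--             continue
--         answer.append(result)
--
--     return answer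
-- ===== SOURCE B (Python) =====
-- def solution(record):
--     case = {}
--     events = []
--     for s in record:
--         tmp = s.split()
--         if tmp[0] == 'Enter':
--             case[tmp[1]] = tmp[2]
--             events.append(('Enter', tmp[1]))
--         elif tmp[0] == 'Change':
--             case[tmp[1]] = tmp[2]
--         elif tmp[0] == 'Leave':
--             events.append(('Leave', tmp[1]))
--     return [case[i] + ('님이 들어왔습니다.' if k == 'Enter' else '님이 나갔습니다.')
--             for (k, i) in events]
-- ===== Notes on version B (the rewrite author's own statement) =====
-- stated objective: alternative
-- what changed: B makes a single pass that splits each line once, building the nickname dict and an (kind, id) event list together, then maps the events to messages, instead of A's two full passes that each re-split every record line.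
import Mathlib
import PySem

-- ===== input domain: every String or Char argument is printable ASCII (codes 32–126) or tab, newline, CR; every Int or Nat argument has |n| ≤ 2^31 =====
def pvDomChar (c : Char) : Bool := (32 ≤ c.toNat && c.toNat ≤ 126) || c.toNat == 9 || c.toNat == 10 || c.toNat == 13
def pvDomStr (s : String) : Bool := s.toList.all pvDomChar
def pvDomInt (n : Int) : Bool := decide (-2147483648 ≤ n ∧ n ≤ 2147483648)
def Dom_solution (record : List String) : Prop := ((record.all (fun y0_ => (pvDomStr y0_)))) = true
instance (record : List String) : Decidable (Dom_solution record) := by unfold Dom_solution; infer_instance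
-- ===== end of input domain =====

-- B fuses A's two full re-split passes into one parse pass (dict + event list) plus a light
-- event-mapping pass; equal return values on Pre_ (alternative decomposition, no speed claim).

-- ===== PORT A =====
def solution (record : List String) : List String :=
  let case :=
    record.foldl (fun d s =>
      let tmp := PySem.Str.split₀ s
      if PySem.List.pyGetD tmp 0 "" = "Enter" ∨ PySem.List.pyGetD tmp 0 "" = "Change" then
        d.insert (PySem.List.pyGetD tmp 1 "") (PySem.List.pyGetD tmp 2 "")
      else d) PySem.Dict.empty
  record.foldl (fun answer s =>
    let tmp := PySem.Str.split₀ s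
    if PySem.List.pyGetD tmp 0 "" = "Enter" then
      answer ++ [case.getD (PySem.List.pyGetD tmp 1 "") "" ++ "님이 들어왔습니다."]
    else if PySem.List.pyGetD tmp 0 "" = "Leave" then
      answer ++ [case.getD (PySem.List.pyGetD tmp 1 "") "" ++ "님이 나갔습니다."]
    else answer) []

-- ===== PORT B =====
def solution_alt (record : List String) : List String :=
  let st := record.foldl (fun (p : PySem.Dict String String × List (String × String)) s =>
      let tmp := PySem.Str.split₀ s
      if PySem.List.pyGetD tmp 0 "" = "Enter" then
        (p.1.insert (PySem.List.pyGetD tmp 1 "") (PySem.List.pyGetD tmp 2 ""),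
         p.2 ++ [("Enter", PySem.List.pyGetD tmp 1 "")])
      else if PySem.List.pyGetD tmp 0 "" = "Change" then
        (p.1.insert (PySem.List.pyGetD tmp 1 "") (PySem.List.pyGetD tmp 2 ""), p.2)
      else if PySem.List.pyGetD tmp 0 "" = "Leave" then
        (p.1, p.2 ++ [("Leave", PySem.List.pyGetD tmp 1 "")])
      else p) (PySem.Dict.empty, ([] : List (String × String)))
  st.2.map (fun kv =>
    st.1.getD kv.2 "" ++ (if kv.1 = "Enter" then "님이 들어왔습니다." else "님이 나갔습니다."))

-- ===== PRECONDITION & SPEC =====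
-- Pre_ excludes exactly the inputs on which the Python A raises (IndexError on a line with too
-- few tokens, KeyError on a 'Leave' whose id no 'Enter'/'Change' line ever names).
def Pre_solution (record : List String) : Prop :=
  ∀ s ∈ record,
    PySem.Str.split₀ s ≠ [] ∧
    ((PySem.List.pyGetD (PySem.Str.split₀ s) 0 "" = "Enter" ∨
      PySem.List.pyGetD (PySem.Str.split₀ s) 0 "" = "Change") →
      3 ≤ (PySem.Str.split₀ s).length) ∧
    (PySem.List.pyGetD (PySem.Str.split₀ s) 0 "" = "Leave" →
      2 ≤ (PySem.Str.split₀ s).length ∧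
      PySem.List.pyGetD (PySem.Str.split₀ s) 1 "" ∈
        record.filterMap (fun r =>
          if PySem.List.pyGetD (PySem.Str.split₀ r) 0 "" = "Enter" ∨
             PySem.List.pyGetD (PySem.Str.split₀ r) 0 "" = "Change"
          then some (PySem.List.pyGetD (PySem.Str.split₀ r) 1 "") else none))
instance (record : List String) : Decidable (Pre_solution record) := by
  unfold Pre_solution; infer_instance
def pvWitness_solution : List String := ["Enter u1 nick", "Change u1 nick2", "Leave u1"]
def Spec_solution (record : List String) (out : List String) : Prop := out = solution_alt record
instance (record : List String) (out : List String) : Decidable (Spec_solution record out) := by unfold Spec_solution; infer_instance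

-- ===== CLAIM (what is proved, stated in full; the proofs are below) =====
def Claim_equal_solution : Prop := ∀ (record : List String), Dom_solution record → Pre_solution record → Spec_solution record (solution record)

-- ===== LEMMAS AND PROOFS =====

def pvEvents (l : List String) : List (String × String) :=
  l.filterMap (fun s =>
    if PySem.List.pyGetD (PySem.Str.split₀ s) 0 "" = "Enter" then
      some ("Enter", PySem.List.pyGetD (PySem.Str.split₀ s) 1 "")
    else if PySem.List.pyGetD (PySem.Str.split₀ s) 0 "" = "Leave" then
      some ("Leave", PySem.List.pyGetD (PySem.Str.split₀ s) 1 "")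
    else none)

-- B's fused fold: dict component equals A's first-pass fold
lemma pv_fst (l : List String) (p : PySem.Dict String String × List (String × String)) :
    (l.foldl (fun (p : PySem.Dict String String × List (String × String)) s =>
      let tmp := PySem.Str.split₀ s
      if PySem.List.pyGetD tmp 0 "" = "Enter" then
        (p.1.insert (PySem.List.pyGetD tmp 1 "") (PySem.List.pyGetD tmp 2 ""),
         p.2 ++ [("Enter", PySem.List.pyGetD tmp 1 "")])
      else if PySem.List.pyGetD tmp 0 "" = "Change" then
        (p.1.insert (PySem.List.pyGetD tmp 1 "") (PySem.List.pyGetD tmp 2 ""), p.2)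
      else if PySem.List.pyGetD tmp 0 "" = "Leave" then
        (p.1, p.2 ++ [("Leave", PySem.List.pyGetD tmp 1 "")])
      else p) p).1 =
    l.foldl (fun d s =>
      let tmp := PySem.Str.split₀ s
      if PySem.List.pyGetD tmp 0 "" = "Enter" ∨ PySem.List.pyGetD tmp 0 "" = "Change" then
        d.insert (PySem.List.pyGetD tmp 1 "") (PySem.List.pyGetD tmp 2 "")
      else d) p.1 := by
  induction l generalizing p with
  | nil => rfl
  | cons s t ih =>
    simp only [List.foldl_cons]
    rw [ih]
    split_ifs with h1 h2 h3 h4 h5 <;> simp_all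

-- B's fused fold: event component appends pvEvents
lemma pv_snd (l : List String) (p : PySem.Dict String String × List (String × String)) :
    (l.foldl (fun (p : PySem.Dict String String × List (String × String)) s =>
      let tmp := PySem.Str.split₀ s
      if PySem.List.pyGetD tmp 0 "" = "Enter" then
        (p.1.insert (PySem.List.pyGetD tmp 1 "") (PySem.List.pyGetD tmp 2 ""),
         p.2 ++ [("Enter", PySem.List.pyGetD tmp 1 "")])
      else if PySem.List.pyGetD tmp 0 "" = "Change" then
        (p.1.insert (PySem.List.pyGetD tmp 1 "") (PySem.List.pyGetD tmp 2 ""), p.2)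
      else if PySem.List.pyGetD tmp 0 "" = "Leave" then
        (p.1, p.2 ++ [("Leave", PySem.List.pyGetD tmp 1 "")])
      else p) p).2 = p.2 ++ pvEvents l := by
  induction l generalizing p with
  | nil => simp [pvEvents]
  | cons s t ih =>
    simp only [List.foldl_cons, pvEvents, List.filterMap_cons]
    split_ifs with h1 h2 h3 <;> simp_all [pvEvents]

-- A's answer loop is the event list mapped through the message function
lemma pv_answer (l : List String) (case : PySem.Dict String String) (acc : List String) :
    l.foldl (fun answer s =>
      let tmp := PySem.Str.split₀ s
      if PySem.List.pyGetD tmp 0 "" = "Enter" then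
        answer ++ [case.getD (PySem.List.pyGetD tmp 1 "") "" ++ "님이 들어왔습니다."]
      else if PySem.List.pyGetD tmp 0 "" = "Leave" then
        answer ++ [case.getD (PySem.List.pyGetD tmp 1 "") "" ++ "님이 나갔습니다."]
      else answer) acc =
    acc ++ (pvEvents l).map (fun kv =>
      case.getD kv.2 "" ++ (if kv.1 = "Enter" then "님이 들어왔습니다." else "님이 나갔습니다.")) := by
  induction l generalizing acc with
  | nil => simp [pvEvents]
  | cons s t ih =>
    simp only [List.foldl_cons, pvEvents, List.filterMap_cons]
    split_ifs with h1 h2 <;> simp_all [pvEvents]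

-- ===== VERDICT (by name: the statement is the Claim_ definition above) =====
theorem solution_spec : Claim_equal_solution := by
  intro record _ _
  unfold Spec_solution
  simp only [solution, solution_alt]
  rw [pv_fst, pv_snd, pv_answer]
  rfl
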